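-- pv_equiv track=rewrite | github.com/Diet-Microbiome-Interactions-Lab/GeneralTools | bioinformatics_tools/miscTools/ChromatographyClasses.py | characterKey
-- ===== SOURCE A (Python) =====
-- def characterKey(list_):
--     values = list_.split('\t')
--     for idx, value in enumerate(values):
--         if '.' in value:
--             values[idx] = values[idx].replace('.', '')
--         if "'" in value:
--             values[idx] = values[idx].replace("'", '')
--         if ' ' in value:
--             values[idx] = values[idx].replace(' ', '_')
--         if '#' in value:
--             values[idx] = values[idx].replace('#', 'Number')
--         if '/' in value:
--             values[idx] = values[idx].replace('/', '_')
--         if '%' in value: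
--             values[idx] = values[idx].replace('%', 'Percent')
--     values.append('Detector')
--     return values
-- ===== SOURCE B (Python) =====
-- _MAP = {'.': '', "'": '', ' ': '_', '#': 'Number', '/': '_', '%': 'Percent'}
--
--
-- def characterKey(list_):
--     return [''.join(_MAP.get(ch, ch) for ch in field)
--             for field in list_.split('\t')] + ['Detector']
-- ===== Notes on version B (the rewrite author's own statement) =====
-- stated objective: idiomatic
-- what changed: Replaces the six sequential membership-test-plus-replace passes per field by one translation dict and a single per-character pass joining mapped fragments (same O(n); no speed claim).
import Mathlib
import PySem

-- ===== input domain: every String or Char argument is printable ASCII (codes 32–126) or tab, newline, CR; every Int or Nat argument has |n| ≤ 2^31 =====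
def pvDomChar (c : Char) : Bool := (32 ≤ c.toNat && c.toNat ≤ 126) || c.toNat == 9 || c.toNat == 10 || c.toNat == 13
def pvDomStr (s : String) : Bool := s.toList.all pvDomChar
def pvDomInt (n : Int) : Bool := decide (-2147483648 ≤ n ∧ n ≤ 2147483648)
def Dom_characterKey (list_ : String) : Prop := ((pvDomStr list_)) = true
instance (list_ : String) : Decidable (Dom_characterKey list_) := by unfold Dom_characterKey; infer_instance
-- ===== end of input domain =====

-- B replaces A's six sequential membership-test-plus-replace passes per field by one
-- translation dict and a single per-character pass (idiomatic; same return value).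

-- ===== PORT A =====
-- body of A's enumerate loop: the loop only rewrites the element at the current index,
-- so it is a map; 'value' is the element as read at the start of the iteration, the
-- replaces chain on the updated values[idx]
def characterKeyStep (value : String) : String :=
  let v := value
  let v := if PySem.Str.isIn "." value then PySem.Str.replace v "." "" else v
  let v := if PySem.Str.isIn "'" value then PySem.Str.replace v "'" "" else v
  let v := if PySem.Str.isIn " " value then PySem.Str.replace v " " "_" else v
  let v := if PySem.Str.isIn "#" value then PySem.Str.replace v "#" "Number" else v
  let v := if PySem.Str.isIn "/" value then PySem.Str.replace v "/" "_" else v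
  let v := if PySem.Str.isIn "%" value then PySem.Str.replace v "%" "Percent" else v
  v

def characterKey (list_ : String) : List String :=
  let values := (PySem.Chars.splitOn list_.toList "\t".toList).map String.ofList
  values.map characterKeyStep ++ ["Detector"]

-- ===== PORT B =====
def pvTransMap : PySem.Dict Char String :=
  PySem.Dict.ofList [('.', ""), ('\'', ""), (' ', "_"), ('#', "Number"), ('/', "_"), ('%', "Percent")]

def pvSanitizeField (field : String) : String :=
  PySem.Str.join "" (field.toList.map (fun ch => pvTransMap.getD ch (String.ofList [ch])))

def characterKey_alt (list_ : String) : List String :=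
  ((PySem.Chars.splitOn list_.toList "\t".toList).map String.ofList).map pvSanitizeField
    ++ ["Detector"]

-- ===== PRECONDITION & SPEC =====
def Spec_characterKey (list_ : String) (out : List String) : Prop := out = characterKey_alt list_
instance (list_ : String) (out : List String) : Decidable (Spec_characterKey list_ out) := by unfold Spec_characterKey; infer_instance

-- ===== CLAIM (what is proved, stated in full; the proofs are below) =====
def Claim_equal_characterKey : Prop := ∀ (list_ : String), Dom_characterKey list_ → Spec_characterKey list_ (characterKey list_)

-- ===== LEMMAS AND PROOFS =====

-- the combined per-character substitution both programs realize
def pvSub (c : Char) : List Char :=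
  if c = '.' then [] else if c = '\'' then [] else if c = ' ' then ['_']
  else if c = '#' then "Number".toList else if c = '/' then ['_']
  else if c = '%' then "Percent".toList else [c]

-- characters that the replacement strings may introduce; none of the six specials is among them
def pvSafe : List Char := "_NumberPcent".toList

-- str.replace with a one-character pattern is the per-character substitution
theorem pvReplaceGo_single (o : Char) (new : List Char) :
    ∀ (cs : List Char) (fuel : Nat) (acc : List Char), cs.length ≤ fuel →
      PySem.Chars.replace.go [o] new fuel cs acc
        = acc.reverse ++ cs.flatMap (fun c => if c = o then new else [c]) := by
  intro cs
  induction cs with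
  | nil =>
      intro fuel acc _
      cases fuel <;> simp [PySem.Chars.replace.go]
  | cons c t ih =>
      intro fuel acc hf
      cases fuel with
      | zero => simp at hf
      | succ f =>
          have hf' : t.length ≤ f := by simpa using hf
          by_cases hc : c = o
          · subst hc
            have hpre : List.isPrefixOf [c] (c :: t) = true := by
              simp [List.isPrefixOf]
            simp only [PySem.Chars.replace.go, hpre, if_pos]
            rw [show List.drop [c].length (c :: t) = t from rfl, ih _ _ hf']
            simp
          · have hpre : List.isPrefixOf [o] (c :: t) = false := by
              simp [List.isPrefixOf]
              exact fun h => (hc h.symm).elim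
            simp only [PySem.Chars.replace.go, hpre]
            rw [ih _ _ hf']
            simp [hc]

theorem pvReplace_single (o : Char) (new cs : List Char) :
    PySem.Chars.replace cs [o] new = cs.flatMap (fun c => if c = o then new else [c]) := by
  simpa using pvReplaceGo_single o new cs cs.length [] le_rfl

-- substitution with a pattern absent from cs is a no-op
theorem pvSubst_noop (o : Char) (new : List Char) (cs : List Char) (h : o ∉ cs) :
    cs.flatMap (fun c => if c = o then new else [c]) = cs := by
  induction cs with
  | nil => rfl
  | cons c t ih =>
      simp only [List.mem_cons, not_or] at h
      simp [List.flatMap_cons, Ne.symm h.1, ih h.2]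

-- every character of a substituted list comes from the source or from new
theorem pvMem_subst (o : Char) (new cs : List Char) (x : Char)
    (hx : x ∈ cs.flatMap (fun c => if c = o then new else [c])) : x ∈ cs ∨ x ∈ new := by
  rcases List.mem_flatMap.mp hx with ⟨c, hc, hxc⟩
  by_cases h : c = o
  · right; simpa [h] using hxc
  · left; simp [h] at hxc; simpa [hxc] using hc

-- one conditional replace of A, with the guard read on the original field cs0
theorem pvCondReplace (o : Char) (new : List Char) (cs0 cur : List Char)
    (hinv : ∀ x ∈ cur, x ∈ cs0 ∨ x ∈ pvSafe) (ho : o ∉ pvSafe) :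
    (if PySem.Chars.isIn [o] cs0 then PySem.Chars.replace cur [o] new else cur)
      = cur.flatMap (fun c => if c = o then new else [c]) := by
  by_cases hg : PySem.Chars.isIn [o] cs0 = true
  · simp [hg, pvReplace_single]
  · have hnot : o ∉ cs0 := by
      intro hmem
      exact hg ((PySem.Chars.isIn_iff_infix _ _).mpr ((List.singleton_infix_iff o cs0).mpr hmem))
    have hcur : o ∉ cur := fun hc => (hinv o hc).elim hnot ho
    simp only [Bool.not_eq_true] at hg
    simp [hg, pvSubst_noop o new cur hcur]

-- the invariant is preserved by a substitution whose replacement is safe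
theorem pvInv_step (o : Char) (new cs0 cur : List Char)
    (hinv : ∀ x ∈ cur, x ∈ cs0 ∨ x ∈ pvSafe) (hnew : ∀ x ∈ new, x ∈ pvSafe) :
    ∀ x ∈ cur.flatMap (fun c => if c = o then new else [c]), x ∈ cs0 ∨ x ∈ pvSafe := by
  intro x hx
  rcases pvMem_subst o new cur x hx with h | h
  · exact hinv x h
  · exact Or.inr (hnew x h)

-- the six substitutions composed are the single combined substitution pvSub
theorem pvSub_comp (c : Char) :
    ((((((if c = '.' then ([] : List Char) else [c]).flatMap
        (fun c => if c = '\'' then [] else [c])).flatMap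
        (fun c => if c = ' ' then ['_'] else [c])).flatMap
        (fun c => if c = '#' then "Number".toList else [c])).flatMap
        (fun c => if c = '/' then ['_'] else [c])).flatMap
        (fun c => if c = '%' then "Percent".toList else [c])) = pvSub c := by
  by_cases h1 : c = '.'
  · subst h1; decide
  by_cases h2 : c = '\''
  · subst h2; decide
  by_cases h3 : c = ' '
  · subst h3; decide
  by_cases h4 : c = '#'
  · subst h4; decide
  by_cases h5 : c = '/'
  · subst h5; decide
  by_cases h6 : c = '%'
  · subst h6; decide
  simp [pvSub, h1, h2, h3, h4, h5, h6]

-- the characters of l all lie in pvSafe, checked by computation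
theorem pvMemSafe (l : List Char) (h : l.all pvSafe.contains = true) : ∀ x ∈ l, x ∈ pvSafe := by
  intro x hx
  have := List.all_eq_true.mp h x hx
  simpa using this

-- the six substitutions chained over a whole list are one pass of pvSub
theorem pvChain_eq (cs : List Char) :
    ((((((cs.flatMap (fun c => if c = '.' then [] else [c])).flatMap
        (fun c => if c = '\'' then [] else [c])).flatMap
        (fun c => if c = ' ' then ['_'] else [c])).flatMap
        (fun c => if c = '#' then "Number".toList else [c])).flatMap
        (fun c => if c = '/' then ['_'] else [c])).flatMap
        (fun c => if c = '%' then "Percent".toList else [c])) = cs.flatMap pvSub := by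
  induction cs with
  | nil => rfl
  | cons c t ih =>
      simp only [List.flatMap_cons, List.flatMap_append, ih]
      rw [← pvSub_comp c]

-- A's per-field pipeline, on char lists, equals one pass of pvSub
theorem pvStep_toList (value : String) :
    (characterKeyStep value).toList = value.toList.flatMap pvSub := by
  set cs := value.toList with hcs
  have inv0 : ∀ x ∈ cs, x ∈ cs ∨ x ∈ pvSafe := fun x hx => Or.inl hx
  have inv1 := pvInv_step '.' "".toList cs cs inv0 (pvMemSafe _ (by decide))
  have inv2 := pvInv_step '\'' "".toList cs _ inv1 (pvMemSafe _ (by decide))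
  have inv3 := pvInv_step ' ' "_".toList cs _ inv2 (pvMemSafe _ (by decide))
  have inv4 := pvInv_step '#' "Number".toList cs _ inv3 (pvMemSafe _ (by decide))
  have inv5 := pvInv_step '/' "_".toList cs _ inv4 (pvMemSafe _ (by decide))
  simp only [characterKeyStep]
  -- push every Str operation to the Chars level
  simp only [apply_ite String.toList, PySem.Str.toList_replace, PySem.Str.isIn_eq]
  rw [show (".".toList) = ['.'] from rfl, show ("'".toList) = ['\''] from rfl,
      show (" ".toList) = [' '] from rfl, show ("#".toList) = ['#'] from rfl,
      show ("/".toList) = ['/'] from rfl, show ("%".toList) = ['%'] from rfl, ← hcs]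
  rw [pvCondReplace '.' "".toList cs cs inv0 (by decide),
      pvCondReplace '\'' "".toList cs _ inv1 (by decide),
      pvCondReplace ' ' "_".toList cs _ inv2 (by decide),
      pvCondReplace '#' "Number".toList cs _ inv3 (by decide),
      pvCondReplace '/' "_".toList cs _ inv4 (by decide),
      pvCondReplace '%' "Percent".toList cs _ inv5 (by decide)]
  rw [show ("".toList : List Char) = [] from rfl, show ("_".toList : List Char) = ['_'] from rfl]
  exact pvChain_eq cs

-- B's per-field pass, on char lists, is the same single pvSub pass
theorem pvSanitize_toList (field : String) :
    (pvSanitizeField field).toList = field.toList.flatMap pvSub := by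
  simp only [pvSanitizeField, PySem.Str.toList_join, PySem.Chars.join, List.map_map]
  have hni : ∀ l : List (List Char), List.intercalate ("".toList) l = l.flatten := by
    intro l
    induction l with
    | nil => rfl
    | cons a t ih => cases t <;> simp_all [List.intercalate, List.intersperse]
  rw [hni, List.flatMap_def]
  congr 1
  refine List.map_congr_left ?_
  intro c _
  simp only [Function.comp_apply]
  by_cases h1 : c = '.'
  · subst h1; decide
  by_cases h2 : c = '\''
  · subst h2; decide
  by_cases h3 : c = ' '
  · subst h3; decide
  by_cases h4 : c = '#'
  · subst h4; decide
  by_cases h5 : c = '/'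
  · subst h5; decide
  by_cases h6 : c = '%'
  · subst h6; decide
  have hitems : pvTransMap.items
      = [('.', ""), ('\'', ""), (' ', "_"), ('#', "Number"), ('/', "_"), ('%', "Percent")] := rfl
  have e1 : ('.' == c) = false := beq_eq_false_iff_ne.mpr (fun e => h1 e.symm)
  have e2 : ('\'' == c) = false := beq_eq_false_iff_ne.mpr (fun e => h2 e.symm)
  have e3 : (' ' == c) = false := beq_eq_false_iff_ne.mpr (fun e => h3 e.symm)
  have e4 : ('#' == c) = false := beq_eq_false_iff_ne.mpr (fun e => h4 e.symm)
  have e5 : ('/' == c) = false := beq_eq_false_iff_ne.mpr (fun e => h5 e.symm)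
  have e6 : ('%' == c) = false := beq_eq_false_iff_ne.mpr (fun e => h6 e.symm)
  simp [PySem.Dict.getD, PySem.Dict.get?, hitems, pvSub, List.find?,
        e1, e2, e3, e4, e5, e6, h1, h2, h3, h4, h5, h6]

theorem pvField_eq (value : String) : characterKeyStep value = pvSanitizeField value :=
  String.toList_inj.mp ((pvStep_toList value).trans (pvSanitize_toList value).symm)

-- ===== VERDICT (by name: the statement is the Claim_ definition above) =====
theorem characterKey_spec : Claim_equal_characterKey := by
  intro list_ _
  unfold Spec_characterKey characterKey characterKey_alt
  simp only [List.map_map]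
  congr 1
  exact List.map_congr_left (fun v _ => pvField_eq (String.ofList v))
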